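-- pv_equiv track=rewrite | github.com/temmie0232/CodingPractice | python/AOJ/ITP1/ITP1_7_B.py | func
-- ===== SOURCE A (Python) =====
-- def func(n,x):
--     ans = 0
--     n_ = n+1
--     for i in range(1,n_):
--         for j in range(i+1,n_):
--             for k in range(j+1,n_):
--                 if i+j+k == x:
--                     ans += 1
--     return ans
-- ===== SOURCE B (Python) =====
-- def func(n, x):
--     ans = 0
--     for i in range(1, n + 1):
--         for j in range(i + 1, n + 1):
--             k = x - i - j
--             if j < k <= n:
--                 ans += 1
--     return ans
-- ===== Notes on version B (the rewrite author's own statement) =====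
-- stated objective: faster
-- what changed: The innermost scan over k is replaced by computing the unique required k = x - i - j and testing j < k <= n in O(1), turning the triple loop into a double loop.
import Mathlib
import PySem

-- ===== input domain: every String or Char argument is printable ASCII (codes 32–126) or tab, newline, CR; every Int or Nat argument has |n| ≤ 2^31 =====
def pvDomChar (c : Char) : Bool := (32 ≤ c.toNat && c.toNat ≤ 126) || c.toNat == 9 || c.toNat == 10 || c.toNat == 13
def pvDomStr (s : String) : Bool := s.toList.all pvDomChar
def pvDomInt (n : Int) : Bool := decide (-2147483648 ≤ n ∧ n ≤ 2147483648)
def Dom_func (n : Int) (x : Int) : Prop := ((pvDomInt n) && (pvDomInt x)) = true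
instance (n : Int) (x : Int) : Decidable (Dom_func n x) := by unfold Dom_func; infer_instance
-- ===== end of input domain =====

-- B replaces A's innermost scan over k by the O(1) test j < x-i-j ≤ n (faster: O(n^2) vs O(n^3)).

-- ===== PORT A =====
def func (n : Int) (x : Int) : Int :=
  let n_ := n + 1
  (PySem.List.pyRange 1 n_ 1).foldl (fun ans i =>
    (PySem.List.pyRange (i + 1) n_ 1).foldl (fun ans j =>
      (PySem.List.pyRange (j + 1) n_ 1).foldl (fun ans k =>
        if i + j + k = x then ans + 1 else ans) ans) ans) 0

-- ===== PORT B =====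
def func_alt (n : Int) (x : Int) : Int :=
  (PySem.List.pyRange 1 (n + 1) 1).foldl (fun ans i =>
    (PySem.List.pyRange (i + 1) (n + 1) 1).foldl (fun ans j =>
      let k := x - i - j
      if j < k ∧ k ≤ n then ans + 1 else ans) ans) 0

-- ===== PRECONDITION & SPEC =====
def Spec_func (n : Int) (x : Int) (out : Int) : Prop := out = func_alt n x
instance (n : Int) (x : Int) (out : Int) : Decidable (Spec_func n x out) := by unfold Spec_func; infer_instance

-- ===== CLAIM (what is proved, stated in full; the proofs are below) =====
def Claim_equal_func : Prop := ∀ (n : Int) (x : Int), Dom_func n x → Spec_func n x (func n x)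

-- ===== LEMMAS AND PROOFS =====

-- counting fold = accumulator + countP
lemma foldl_if_count (p : Int → Prop) [DecidablePred p] (l : List Int) (a : Int) :
    l.foldl (fun a k => if p k then a + 1 else a) a = a + (l.countP (fun k => decide (p k)) : Int) := by
  induction l generalizing a with
  | nil => simp
  | cons h t ih =>
      simp only [List.foldl_cons, List.countP_cons, ih]
      by_cases hp : p h <;> simp only [hp, if_true, if_false, decide_true, decide_false] <;>
        push_cast <;> omega

-- the innermost loop of A counts at most one k, characterised in closed form
lemma inner_eq (i j n x a : Int) :
    (PySem.List.pyRange (j + 1) (n + 1) 1).foldl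
      (fun a k => if i + j + k = x then a + 1 else a) a
    = if j < x - i - j ∧ x - i - j ≤ n then a + 1 else a := by
  rw [foldl_if_count]
  have hcongr : (PySem.List.pyRange (j + 1) (n + 1) 1).countP (fun k => decide (i + j + k = x))
      = (PySem.List.pyRange (j + 1) (n + 1) 1).count (x - i - j) := by
    rw [List.count_eq_countP]
    apply List.countP_congr
    intro k _
    have hiff : (i + j + k = x) ↔ (k = x - i - j) := by omega
    simp [hiff]
  rw [hcongr]
  by_cases hm : (x - i - j) ∈ PySem.List.pyRange (j + 1) (n + 1) 1
  · rw [List.count_eq_one_of_mem (PySem.List.nodup_pyRange_one _ _) hm]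
    rw [PySem.List.mem_pyRange_one] at hm
    rw [if_pos (by omega)]; ring
  · rw [List.count_eq_zero_of_not_mem hm]
    rw [PySem.List.mem_pyRange_one] at hm
    rw [if_neg (by omega)]; ring

-- ===== VERDICT (by name: the statement is the Claim_ definition above) =====
theorem func_spec : Claim_equal_func := by
  intro n x _
  unfold Spec_func func func_alt
  show (PySem.List.pyRange 1 (n + 1) 1).foldl (fun ans i =>
      (PySem.List.pyRange (i + 1) (n + 1) 1).foldl (fun ans j =>
        (PySem.List.pyRange (j + 1) (n + 1) 1).foldl (fun ans k =>
          if i + j + k = x then ans + 1 else ans) ans) ans) 0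
    = (PySem.List.pyRange 1 (n + 1) 1).foldl (fun ans i =>
      (PySem.List.pyRange (i + 1) (n + 1) 1).foldl (fun ans j =>
        if j < x - i - j ∧ x - i - j ≤ n then ans + 1 else ans) ans) 0
  congr 1
  funext ans i
  congr 1
  funext a j
  exact inner_eq i j n x a
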